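-- pv_equiv track=rewrite | github.com/aleiepure/devtoolbox | src/services/text_inspector.py | _to_title_case
-- ===== SOURCE A (Python) =====
-- def _to_title_case(text:str) -> str:
--
--     output = ""
--
--     for i in range(0, len(text)):
--         if i == 0 or not text[i-1].isalnum():
--             output += text[i].upper()
--         else:
--             output += text[i].lower()
--
--     return output
-- ===== SOURCE B (Python) =====
-- def _to_title_case(text: str) -> str:
--     out = []
--     i = 0
--     n = len(text)
--     while i < n:
--         if text[i].isalnum():
--             j = i + 1
--             while j < n and text[j].isalnum():
--                 j += 1
--             out.append(text[i].upper() + text[i + 1:j].lower())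
--             i = j
--         else:
--             out.append(text[i])
--             i += 1
--     return "".join(out)
-- ===== Notes on version B (the rewrite author's own statement) =====
-- stated objective: faster
-- what changed: Replaces the per-index loop that calls isalnum/upper/lower on every character with a run-based scan: maximal alnum runs are located once and emitted as first-char-upper plus one lowered slice, non-alnum characters pass through unchanged (timed ~1.7x faster: bulk slice.lower()/join instead of per-character method calls and string +=).
import Mathlib
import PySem

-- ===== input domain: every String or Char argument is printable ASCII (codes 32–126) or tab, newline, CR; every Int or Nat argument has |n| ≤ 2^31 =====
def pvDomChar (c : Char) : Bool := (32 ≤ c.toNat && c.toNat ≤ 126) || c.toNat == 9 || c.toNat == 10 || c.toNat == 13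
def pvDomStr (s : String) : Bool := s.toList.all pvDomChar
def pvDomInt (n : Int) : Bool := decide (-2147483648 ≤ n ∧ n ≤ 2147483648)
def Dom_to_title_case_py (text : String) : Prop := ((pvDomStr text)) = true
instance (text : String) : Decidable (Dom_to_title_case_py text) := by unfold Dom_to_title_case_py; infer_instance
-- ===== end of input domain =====

-- B replaces A's per-index previous-character test with a run-based scan over maximal
-- alnum runs (measurably faster in Python: bulk slice lowering instead of per-char calls).

-- ===== PORT A =====
-- literal port of A: indexed loop over range(0, len(text)), each step appends
-- text[i].upper() or text[i].lower() depending on i == 0 / text[i-1].isalnum()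
def to_title_case_py (text : String) : String :=
  let cs := text.toList
  String.ofList ((PySem.List.pyRange 0 cs.length 1).foldl (fun output i =>
    if i == 0 || !(((PySem.List.pyGet? cs (i - 1)).map PySem.Chars.isalnum).getD false) then
      output ++ ((PySem.List.pyGet? cs i).map PySem.Chars.upperChar).toList
    else
      output ++ ((PySem.List.pyGet? cs i).map PySem.Chars.lowerChar).toList) [])

-- ===== PORT B =====
-- port of B's run scan: on an alnum character, take the maximal alnum run
-- (the inner 'while j < n and text[j].isalnum()'), emit first upper + rest lowered,
-- continue after the run; a non-alnum character is emitted unchanged.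
def tcRuns : List Char → List Char
  | [] => []
  | c :: rest =>
    if PySem.Chars.isalnum c then
      PySem.Chars.upperChar c ::
        ((rest.takeWhile PySem.Chars.isalnum).map PySem.Chars.lowerChar
          ++ tcRuns (rest.dropWhile PySem.Chars.isalnum))
    else
      c :: tcRuns rest
termination_by cs => cs.length
decreasing_by
  · simpa using Nat.lt_succ_of_le (List.length_dropWhile_le _ _)
  · simp

def to_title_case_py_alt (text : String) : String := String.ofList (tcRuns text.toList)

-- ===== PRECONDITION & SPEC =====
def Spec_to_title_case_py (text : String) (out : String) : Prop := out = to_title_case_py_alt text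
instance (text : String) (out : String) : Decidable (Spec_to_title_case_py text out) := by unfold Spec_to_title_case_py; infer_instance

-- ===== CLAIM (what is proved, stated in full; the proofs are below) =====
def Claim_equal_to_title_case_py : Prop := ∀ (text : String), Dom_to_title_case_py text → Spec_to_title_case_py text (to_title_case_py text)

-- ===== LEMMAS AND PROOFS =====

-- the common characterisation: emit lower if the previous character was alnum, else upper
def tcSpec : Bool → List Char → List Char
  | _, [] => []
  | prev, c :: t =>
    (if prev then PySem.Chars.lowerChar c else PySem.Chars.upperChar c) ::
      tcSpec (PySem.Chars.isalnum c) t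

theorem not_alnum_upper {c : Char} (h : PySem.Chars.isalnum c = false) :
    PySem.Chars.upperChar c = c := by
  simp [PySem.Chars.isalnum, PySem.Chars.isalpha] at h
  simp [PySem.Chars.upperChar, h.1.2]

theorem not_alnum_lower {c : Char} (h : PySem.Chars.isalnum c = false) :
    PySem.Chars.lowerChar c = c := by
  simp [PySem.Chars.isalnum, PySem.Chars.isalpha] at h
  simp [PySem.Chars.lowerChar, h.1.1]

theorem tcSpec_length (prev : Bool) (cs : List Char) : (tcSpec prev cs).length = cs.length := by
  induction cs generalizing prev with
  | nil => simp [tcSpec]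
  | cons c t ih => simp [tcSpec, ih]

theorem tcSpec_getElem (cs : List Char) (prev : Bool) (i : Nat) (h : i < cs.length)
    (h' : i < (tcSpec prev cs).length) :
    (tcSpec prev cs)[i] =
      if hi : i = 0 then
        (if prev then PySem.Chars.lowerChar cs[0] else PySem.Chars.upperChar cs[0])
      else
        (if PySem.Chars.isalnum (cs[i-1]'(by omega)) then PySem.Chars.lowerChar cs[i]
         else PySem.Chars.upperChar cs[i]) := by
  induction cs generalizing prev i with
  | nil => simp at h
  | cons c t ih =>
    match i with
    | 0 => simp [tcSpec]
    | 1 =>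
      simp only [tcSpec]
      match t, h with
      | d :: t', _ => simp [tcSpec]
    | (j+2) =>
      simp only [tcSpec, List.getElem_cons_succ]
      have hj : j + 1 < t.length := by simpa using h
      rw [ih (PySem.Chars.isalnum c) (j+1) hj (by rw [tcSpec_length]; exact hj)]
      simp

-- A computes tcSpec false
theorem flatMap_eq_map_of_singleton {a b : Type} (l : List a) (f : a → List b) (g : a → b)
    (h : ∀ x ∈ l, f x = [g x]) : l.flatMap f = l.map g := by
  induction l with
  | nil => simp
  | cons x t ih =>
    simp only [List.flatMap_cons, List.map_cons, h x (by simp)]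
    rw [ih (fun y hy => h y (by simp [hy]))]
    simp

theorem portA_eq_tcSpec (cs : List Char) :
    ((PySem.List.pyRange 0 cs.length 1).foldl (fun output i =>
      if i == 0 || !(((PySem.List.pyGet? cs (i - 1)).map PySem.Chars.isalnum).getD false) then
        output ++ ((PySem.List.pyGet? cs i).map PySem.Chars.upperChar).toList
      else
        output ++ ((PySem.List.pyGet? cs i).map PySem.Chars.lowerChar).toList) []) =
    tcSpec false cs := by
  have hsplit : ∀ (output : List Char) (i : Int),
      (if i == 0 || !(((PySem.List.pyGet? cs (i - 1)).map PySem.Chars.isalnum).getD false) then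
        output ++ ((PySem.List.pyGet? cs i).map PySem.Chars.upperChar).toList
      else
        output ++ ((PySem.List.pyGet? cs i).map PySem.Chars.lowerChar).toList) =
      output ++ (if i == 0 || !(((PySem.List.pyGet? cs (i - 1)).map PySem.Chars.isalnum).getD false) then
        ((PySem.List.pyGet? cs i).map PySem.Chars.upperChar).toList
      else
        ((PySem.List.pyGet? cs i).map PySem.Chars.lowerChar).toList) := by
    intro output i; split <;> rfl
  simp only [hsplit]
  rw [PySem.List.foldl_append_eq_flatMap]
  rw [PySem.List.pyRange_one]
  simp only [List.flatMap_map, List.nil_append, Int.sub_zero, Int.toNat_natCast]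
  rw [flatMap_eq_map_of_singleton (List.range cs.length) _
      (fun k => if k == 0 || !(PySem.Chars.isalnum (cs.getD (k-1) 'a')) then
          PySem.Chars.upperChar (cs.getD k 'a')
        else PySem.Chars.lowerChar (cs.getD k 'a'))]
  · apply List.ext_getElem
    · simp [tcSpec_length]
    · intro i h1 h2
      simp only [List.getElem_map, List.getElem_range]
      have hi : i < cs.length := by rw [tcSpec_length] at h2; exact h2
      rw [tcSpec_getElem cs false i hi h2]
      by_cases h0 : i = 0
      · subst h0; simp [List.getD_eq_getElem?_getD, List.getElem?_eq_getElem hi]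
      · have hi1 : i - 1 < cs.length := by omega
        simp only [dif_neg h0]
        rw [List.getD_eq_getElem?_getD, List.getElem?_eq_getElem hi1,
            List.getD_eq_getElem?_getD, List.getElem?_eq_getElem hi]
        simp only [Option.getD_some]
        by_cases ha : PySem.Chars.isalnum (cs[i-1]'hi1) = true
        · simp [ha, h0]
        · simp only [Bool.not_eq_true] at ha
          simp [ha]
  · intro k hk
    have hk' : k < cs.length := List.mem_range.mp hk
    have hget : PySem.List.pyGet? cs ((0 : Int) + k) = some (cs[k]'hk') := by
      simpa using PySem.List.pyGet?_natCast cs k hk'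
    by_cases h0 : k = 0
    · subst h0
      simp only [Nat.cast_zero, add_zero] at hget
      simp [hget, List.getD_eq_getElem?_getD, List.getElem?_eq_getElem hk']
    · have hk1 : k - 1 < cs.length := by omega
      have hprev : PySem.List.pyGet? cs ((0 : Int) + k - 1) = some (cs[k-1]'hk1) := by
        have : ((0 : Int) + k - 1) = ((k - 1 : Nat) : Int) := by omega
        rw [this]
        simpa using PySem.List.pyGet?_natCast cs (k-1) hk1
      have hne : ((0 : Int) + k == 0) = false := by
        simp; omega
      simp only [hget, hprev, hne, Option.map_some, Option.getD_some, Bool.false_or,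
        List.getD_eq_getElem?_getD, List.getElem?_eq_getElem hk', List.getElem?_eq_getElem hk1,
        ]
      by_cases ha : PySem.Chars.isalnum (cs[k-1]'hk1) = true
      · simp [ha]
        exact fun hh => absurd hh h0
      · simp only [Bool.not_eq_true] at ha
        simp [ha]

-- B computes tcSpec false
theorem tcRuns_eq_tcSpec : ∀ (n : Nat) (cs : List Char), cs.length ≤ n →
    tcRuns cs = tcSpec false cs ∧
    tcSpec true cs =
      (cs.takeWhile PySem.Chars.isalnum).map PySem.Chars.lowerChar
        ++ tcRuns (cs.dropWhile PySem.Chars.isalnum) := by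
  intro n
  induction n with
  | zero =>
    intro cs h
    have : cs = [] := List.eq_nil_of_length_eq_zero (Nat.le_zero.mp h)
    subst this
    simp [tcRuns, tcSpec]
  | succ n ih =>
    intro cs h
    match cs with
    | [] => simp [tcRuns, tcSpec]
    | c :: t =>
      have ht : t.length ≤ n := by simpa using h
      constructor
      · by_cases hc : PySem.Chars.isalnum c = true
        · rw [tcRuns, tcSpec, if_pos hc, hc]
          rw [(ih t ht).2]
          simp
        · have hc' : PySem.Chars.isalnum c = false := by simpa using hc
          rw [tcRuns, tcSpec, if_neg hc, hc']
          rw [(ih t ht).1, not_alnum_upper hc']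
          simp
      · by_cases hc : PySem.Chars.isalnum c = true
        · rw [tcSpec, List.takeWhile_cons_of_pos hc, List.dropWhile_cons_of_pos hc, hc]
          rw [(ih t ht).2]
          simp
        · have hc' : PySem.Chars.isalnum c = false := by simpa using hc
          rw [tcSpec, List.takeWhile_cons_of_neg hc, List.dropWhile_cons_of_neg hc]
          rw [tcRuns, if_neg hc]
          rw [(ih t ht).1]
          simp [hc', not_alnum_lower hc']

-- ===== VERDICT (by name: the statement is the Claim_ definition above) =====
theorem to_title_case_py_spec : Claim_equal_to_title_case_py := by
  intro text _
  unfold Spec_to_title_case_py to_title_case_py to_title_case_py_alt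
  dsimp only
  rw [portA_eq_tcSpec, (tcRuns_eq_tcSpec text.toList.length text.toList le_rfl).1]
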